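-- pv_equiv track=rewrite | github.com/634nakajima/interplay | pd_file.py | _clean_pd_content
-- ===== SOURCE A (Python) =====
-- def _clean_pd_content(raw: str) -> str | None:
--     """Keep only valid Pd lines (#N, #X) from raw text."""
--     lines = []
--     for line in raw.strip().split("\n"):
--         stripped = line.strip()
--         if stripped.startswith(("#N ", "#X ")):
--             lines.append(stripped)
--         elif lines:
--             # Stop at the first non-Pd line after we've started collecting
--             break
--     if lines and lines[0].startswith("#N canvas"):
--         return "\n".join(lines)
--     return None
-- ===== SOURCE B (Python) =====
-- def _is_pd(s):
--     return s.startswith(("#N ", "#X "))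
--
--
-- def _clean_pd_content(raw: str) -> str | None:
--     """Keep only valid Pd lines (#N, #X) from raw text."""
--     stripped = [line.strip() for line in raw.strip().split("\n")]
--     n = len(stripped)
--     i = 0
--     while i < n and not _is_pd(stripped[i]):
--         i += 1
--     j = i
--     while j < n and _is_pd(stripped[j]):
--         j += 1
--     run = stripped[i:j]
--     if run and run[0].startswith("#N canvas"):
--         return "\n".join(run)
--     return None
-- ===== Notes on version B (the rewrite author's own statement) =====
-- stated objective: alternative
-- what changed: Replaced A's single accumulator loop with break-on-first-non-Pd-line by pre-stripping all lines once and two index scans (skip the non-Pd prefix, take the contiguous Pd run) followed by a slice; the final canvas guard is unchanged.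
import Mathlib
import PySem

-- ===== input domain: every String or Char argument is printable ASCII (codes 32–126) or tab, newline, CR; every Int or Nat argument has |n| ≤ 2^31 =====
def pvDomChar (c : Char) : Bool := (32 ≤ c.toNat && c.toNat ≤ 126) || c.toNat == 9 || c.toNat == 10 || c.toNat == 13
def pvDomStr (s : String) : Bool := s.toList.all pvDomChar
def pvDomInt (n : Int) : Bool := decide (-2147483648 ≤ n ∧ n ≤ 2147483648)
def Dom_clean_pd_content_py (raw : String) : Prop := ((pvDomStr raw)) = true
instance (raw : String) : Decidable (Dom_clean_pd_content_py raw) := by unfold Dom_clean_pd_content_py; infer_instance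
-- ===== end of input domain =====

-- B replaces A's accumulator loop with an early break by pre-stripping all lines and two
-- forward scans (skip non-Pd prefix, take the contiguous Pd run); alternative decomposition, same cost.

-- ===== PORT A =====
-- A's for-loop: accumulate stripped Pd lines, break at the first non-Pd line once collecting started.
def pdA_loop : List String → List String → List String
  | [], acc => acc
  | line :: rest, acc =>
    let stripped := PySem.Str.strip line
    if PySem.Str.startswith stripped "#N " || PySem.Str.startswith stripped "#X " then
      pdA_loop rest (acc ++ [stripped])
    else if acc ≠ [] then acc
    else pdA_loop rest acc

def clean_pd_content_py (raw : String) : Option String :=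
  let lines := pdA_loop ((PySem.Str.split? (PySem.Str.strip raw) "\n").getD []) []
  match lines with
  | [] => none
  | first :: _ =>
    if PySem.Str.startswith first "#N canvas" then some (PySem.Str.join "\n" lines) else none

-- ===== PORT B =====
def pdB_isPd (s : String) : Bool :=
  PySem.Str.startswith s "#N " || PySem.Str.startswith s "#X "

-- Source B's first while loop (advance i past non-Pd lines), ported as recursion on the
-- remaining suffix stripped[i:]; returns that suffix.
def pdB_skip : List String → List String
  | [] => []
  | s :: rest => if pdB_isPd s then s :: rest else pdB_skip rest

-- Source B's second while loop (advance j through Pd lines); returns the slice stripped[i:j].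
def pdB_take : List String → List String
  | [] => []
  | s :: rest => if pdB_isPd s then s :: pdB_take rest else []

def clean_pd_content_py_alt (raw : String) : Option String :=
  let stripped := ((PySem.Str.split? (PySem.Str.strip raw) "\n").getD []).map PySem.Str.strip
  let run := pdB_take (pdB_skip stripped)
  match run with
  | [] => none
  | first :: _ =>
    if PySem.Str.startswith first "#N canvas" then some (PySem.Str.join "\n" run) else none

-- ===== PRECONDITION & SPEC =====
def Spec_clean_pd_content_py (raw : String) (out : Option String) : Prop := out = clean_pd_content_py_alt raw
instance (raw : String) (out : Option String) : Decidable (Spec_clean_pd_content_py raw out) := by unfold Spec_clean_pd_content_py; infer_instance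

-- ===== CLAIM (what is proved, stated in full; the proofs are below) =====
def Claim_equal_clean_pd_content_py : Prop := ∀ (raw : String), Dom_clean_pd_content_py raw → Spec_clean_pd_content_py raw (clean_pd_content_py raw)

-- ===== LEMMAS AND PROOFS =====

-- Once the accumulator is nonempty, A's loop appends exactly the contiguous Pd run.
theorem pdA_loop_collect (xs : List String) (acc : List String) (h : acc ≠ []) :
    pdA_loop xs acc = acc ++ pdB_take (xs.map PySem.Str.strip) := by
  induction xs generalizing acc with
  | nil => simp [pdA_loop, pdB_take]
  | cons x rest ih =>
    simp only [pdA_loop, List.map_cons, pdB_take, pdB_isPd]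
    split
    · rw [ih (acc ++ [PySem.Str.strip x]) (by simp)]
      simp
    · simp

-- With the empty accumulator, A's loop is skip-then-take over the stripped lines.
theorem pdA_loop_eq (xs : List String) :
    pdA_loop xs [] = pdB_take (pdB_skip (xs.map PySem.Str.strip)) := by
  induction xs with
  | nil => simp [pdA_loop, pdB_skip, pdB_take]
  | cons x rest ih =>
    simp only [pdA_loop, List.map_cons, pdB_skip, pdB_isPd]
    split
    · rename_i hpd
      simp only [List.nil_append]
      rw [pdA_loop_collect rest [PySem.Str.strip x] (by simp)]
      simp only [pdB_take, pdB_isPd, hpd, if_true, List.singleton_append]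
    · simpa using ih

-- ===== VERDICT (by name: the statement is the Claim_ definition above) =====
theorem clean_pd_content_py_spec : Claim_equal_clean_pd_content_py := by
  intro raw _
  unfold Spec_clean_pd_content_py clean_pd_content_py clean_pd_content_py_alt
  rw [pdA_loop_eq]
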